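-- pv_equiv track=rewrite | github.com/0xchamin/CPU2Music | trace_to_music.py | extract_opcode
-- ===== SOURCE A (Python) =====
-- def extract_opcode(instruction):
--     """Extract opcode from assembly instruction"""
--     if not instruction or instruction == 'unknown':
--         return 'mov'
--
--     # Split instruction and get first part (opcode)
--     parts = instruction.split()
--     if parts:
--         opcode = parts[0].lower()
--         # Remove suffixes like 'movq' -> 'mov'
--         base_opcodes = ['mov', 'add', 'sub', 'mul', 'div', 'cmp', 'jmp',
--                        'call', 'ret', 'push', 'pop', 'lea', 'xor', 'and', 'or']
--         for base in base_opcodes: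
--             if opcode.startswith(base):
--                 return base
--         return opcode
--     return 'mov'
-- ===== SOURCE B (Python) =====
-- _BASE_OPCODES = ['mov', 'add', 'sub', 'mul', 'div', 'cmp', 'jmp',
--                  'call', 'ret', 'push', 'pop', 'lea', 'xor', 'and', 'or']
--
--
-- def _insert(trie, chars, word):
--     """Insert word along chars into the (terminal, edges) trie, functionally."""
--     term, edges = trie
--     if not chars:
--         return (word, edges)
--     c = chars[0]
--     child = edges.get(c, (None, {}))
--     new_edges = dict(edges)
--     new_edges[c] = _insert(child, chars[1:], word)
--     return (term, new_edges)
--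
--
-- _TRIE = (None, {})
-- for _b in _BASE_OPCODES:
--     _TRIE = _insert(_TRIE, list(_b), _b)
--
--
-- def _walk(trie, chars, opcode):
--     """Follow chars down the trie; return the first terminal hit, else opcode."""
--     term, edges = trie
--     if term is not None:
--         return term
--     if not chars or chars[0] not in edges:
--         return opcode
--     return _walk(edges[chars[0]], chars[1:], opcode)
--
--
-- def extract_opcode(instruction):
--     """Extract opcode from assembly instruction"""
--     if not instruction or instruction == 'unknown':
--         return 'mov'
--     parts = instruction.split()
--     if not parts:
--         return 'mov'
--     opcode = parts[0].lower()
--     return _walk(_TRIE, list(opcode), opcode)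
-- ===== Notes on version B (the rewrite author's own statement) =====
-- stated objective: alternative
-- what changed: Replaces A's linear startswith scan over the 15 base opcodes with a prefix trie built once from the base list; the lowered token is matched by walking the trie character by character, returning the terminal hit (correct because no base opcode is a prefix of another) or the token itself.
import Mathlib
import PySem

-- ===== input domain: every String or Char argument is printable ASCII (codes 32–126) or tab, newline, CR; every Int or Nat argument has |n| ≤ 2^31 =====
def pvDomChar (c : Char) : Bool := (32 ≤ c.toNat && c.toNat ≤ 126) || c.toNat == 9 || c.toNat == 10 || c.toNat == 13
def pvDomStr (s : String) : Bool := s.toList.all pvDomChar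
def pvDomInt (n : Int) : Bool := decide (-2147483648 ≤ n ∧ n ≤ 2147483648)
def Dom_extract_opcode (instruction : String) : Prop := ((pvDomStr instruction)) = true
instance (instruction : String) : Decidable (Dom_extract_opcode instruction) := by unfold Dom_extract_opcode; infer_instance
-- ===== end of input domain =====

-- B replaces A's linear startswith scan over the base opcodes by a prefix trie built
-- once from the base list and walked character by character; alternative, same behaviour.

-- ===== PORT A =====
def pvBases : List String :=
  ["mov", "add", "sub", "mul", "div", "cmp", "jmp",
   "call", "ret", "push", "pop", "lea", "xor", "and", "or"]

-- the 'for base in base_opcodes: if opcode.startswith(base): return base' loop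
def pvScanA (bases : List String) (opcode : String) : String :=
  match bases with
  | [] => opcode
  | b :: rest => if PySem.Str.startswith opcode b then b else pvScanA rest opcode

def extract_opcode (instruction : String) : String :=
  if instruction = "" ∨ instruction = "unknown" then "mov"
  else
    match PySem.Str.split₀ instruction with
    | [] => "mov"
    | p :: _ => pvScanA pvBases (PySem.Str.lower p)

-- ===== PORT B =====
def pvBaseOpcodes : List String :=
  ["mov", "add", "sub", "mul", "div", "cmp", "jmp",
   "call", "ret", "push", "pop", "lea", "xor", "and", "or"]

-- the trie: a node is (terminal, edges); edges are an explicit child list (mutual pair,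
-- mirroring the Python (term, dict) pairs with the dict as an insertion-order list)
mutual
inductive PvTrie where
  | node : Option String → PvEdges → PvTrie
inductive PvEdges where
  | enil : PvEdges
  | econs : Char → PvTrie → PvEdges → PvEdges
end

-- edges.get(c) / edges[c]
def pvEdgesGet : PvEdges → Char → Option PvTrie
  | .enil, _ => none
  | .econs c' t rest, c => if c' = c then some t else pvEdgesGet rest c

-- new_edges[c] = t (overwrite in place, else append; Python dict update order)
def pvEdgesSet : PvEdges → Char → PvTrie → PvEdges
  | .enil, c, t => .econs c t .enil
  | .econs c' t' rest, c, t =>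
      if c' = c then .econs c' t rest else .econs c' t' (pvEdgesSet rest c t)

-- _insert(trie, chars, word)
def pvInsert : PvTrie → List Char → String → PvTrie
  | .node _ edges, [], w => .node (some w) edges
  | .node term edges, c :: cs, w =>
      let child := (pvEdgesGet edges c).getD (.node none .enil)
      .node term (pvEdgesSet edges c (pvInsert child cs w))
termination_by structural _ cs => cs

-- the module-level build loop: _TRIE = (None, {}); for b in bases: _TRIE = _insert(...)
def pvTrie : PvTrie :=
  pvBaseOpcodes.foldl (fun t b => pvInsert t b.toList b) (.node none .enil)

-- _walk(trie, chars, opcode)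
def pvWalk : PvTrie → List Char → String → String
  | .node (some w) _, _, _ => w
  | .node none _, [], op => op
  | .node none edges, c :: cs, op =>
      match pvEdgesGet edges c with
      | none => op
      | some t => pvWalk t cs op
termination_by structural _ cs => cs

def extract_opcode_alt (instruction : String) : String :=
  if instruction = "" ∨ instruction = "unknown" then "mov"
  else
    match PySem.Str.split₀ instruction with
    | [] => "mov"
    | p :: _ =>
        let opcode := PySem.Str.lower p
        pvWalk pvTrie opcode.toList opcode

-- ===== PRECONDITION & SPEC =====
def Spec_extract_opcode (instruction : String) (out : String) : Prop := out = extract_opcode_alt instruction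
instance (instruction : String) (out : String) : Decidable (Spec_extract_opcode instruction out) := by unfold Spec_extract_opcode; infer_instance

-- ===== CLAIM (what is proved, stated in full; the proofs are below) =====
def Claim_equal_extract_opcode : Prop := ∀ (instruction : String), Dom_extract_opcode instruction → Spec_extract_opcode instruction (extract_opcode instruction)

-- ===== LEMMAS AND PROOFS =====

-- startswith over strings is list-prefix over their characters
theorem pv_startswith_iff (op w : String) :
    PySem.Str.startswith op w = true ↔ w.toList <+: op.toList := by
  rw [PySem.Str.startswith_eq, PySem.Chars.startswith_iff]

-- at most one base opcode is a prefix of any given opcode (none is a prefix of another)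
theorem pv_unique (op : String) (b₁ b₂ : String) (h₁ : b₁ ∈ pvBases) (h₂ : b₂ ∈ pvBases)
    (s₁ : PySem.Str.startswith op b₁ = true) (s₂ : PySem.Str.startswith op b₂ = true) :
    b₁ = b₂ := by
  rw [pv_startswith_iff] at s₁ s₂
  have hnp : ∀ x ∈ pvBases, ∀ y ∈ pvBases, x.toList <+: y.toList → x = y := by decide
  rcases List.prefix_or_prefix_of_prefix s₁ s₂ with h | h
  · exact hnp _ h₁ _ h₂ h
  · exact (hnp _ h₂ _ h₁ h).symm

-- A's scan returns the opcode itself when no base matches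
theorem pv_scanA_none (bases : List String) (op : String)
    (h : ∀ b ∈ bases, PySem.Str.startswith op b = false) : pvScanA bases op = op := by
  induction bases with
  | nil => rfl
  | cons b rest ih =>
      simp only [pvScanA, h b (by simp)]
      exact ih (fun b' hb' => h b' (by simp [hb']))

-- A's scan returns the (unique) matching base
theorem pv_scanA_hit (bases : List String) (op : String) (b : String) (hb : b ∈ bases)
    (hsw : PySem.Str.startswith op b = true)
    (huniq : ∀ b' ∈ bases, PySem.Str.startswith op b' = true → b' = b) :
    pvScanA bases op = b := by
  induction bases with
  | nil => cases hb
  | cons c rest ih =>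
      show (if PySem.Str.startswith op c then c else pvScanA rest op) = b
      by_cases hc : PySem.Str.startswith op c = true
      · rw [if_pos hc]
        exact huniq c (by simp) hc
      · rw [if_neg hc]
        rcases List.mem_cons.mp hb with rfl | hb'
        · exact absurd hsw hc
        · exact ih hb' (fun b' hb'' h => huniq b' (by simp [hb'']) h)

-- the terminal words stored in a trie
def pvTerms : PvTrie → List String
  | .node none edges => pvEdgeTermsX edges
  | .node (some w) edges => w :: pvEdgeTermsX edges
where pvEdgeTermsX : PvEdges → List String
  | .enil => []
  | .econs _ t rest => pvTerms t ++ pvEdgeTermsX rest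

-- invariant: every terminal stores exactly the path that reaches it (relative to pre)
def pvTrieOk : List Char → PvTrie → Bool
  | pre, .node none edges => pvEdgesOkX pre edges
  | pre, .node (some w) edges => (w.toList == pre) && pvEdgesOkX pre edges
where pvEdgesOkX : List Char → PvEdges → Bool
  | _, .enil => true
  | pre, .econs c t rest => pvTrieOk (pre ++ [c]) t && pvEdgesOkX pre rest

theorem pv_edgesGet_ok : ∀ (edges : PvEdges) (pre : List Char) (c : Char) (t : PvTrie),
    pvTrieOk.pvEdgesOkX pre edges = true → pvEdgesGet edges c = some t →
    pvTrieOk (pre ++ [c]) t = true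
  | .enil, _, _, _, _, hget => by cases hget
  | .econs c' t' rest, pre, c, t, hok, hget => by
      simp only [pvTrieOk.pvEdgesOkX, Bool.and_eq_true] at hok
      simp only [pvEdgesGet] at hget
      by_cases hc : c' = c
      · rw [if_pos hc] at hget
        cases hget
        subst hc
        exact hok.1
      · rw [if_neg hc] at hget
        exact pv_edgesGet_ok rest pre c t hok.2 hget

theorem pv_edgesGet_terms : ∀ (edges : PvEdges) (c : Char) (t : PvTrie) (w : String),
    pvEdgesGet edges c = some t → w ∈ pvTerms t → w ∈ pvTerms.pvEdgeTermsX edges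
  | .enil, _, _, _, hget, _ => by cases hget
  | .econs c' t' rest, c, t, w, hget, hw => by
      simp only [pvEdgesGet] at hget
      simp only [pvTerms.pvEdgeTermsX, List.mem_append]
      by_cases hc : c' = c
      · rw [if_pos hc] at hget
        cases hget
        exact Or.inl hw
      · rw [if_neg hc] at hget
        exact Or.inr (pv_edgesGet_terms rest c t w hget hw)

-- soundness of the walk: it returns the default, or a terminal of the trie that is a
-- prefix of the consumed path
theorem pv_walk_sound (cs : List Char) (t : PvTrie) (pre : List Char) (op : String)
    (hok : pvTrieOk pre t = true) :
    pvWalk t cs op = op ∨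
      ∃ w, w ∈ pvTerms t ∧ w.toList <+: pre ++ cs ∧ pvWalk t cs op = w := by
  induction cs generalizing t pre with
  | nil =>
      obtain ⟨term, edges⟩ := t
      cases term with
      | none => exact Or.inl rfl
      | some w =>
          refine Or.inr ⟨w, by simp [pvTerms], ?_, rfl⟩
          simp only [pvTrieOk, Bool.and_eq_true, beq_iff_eq] at hok
          simp [hok.1]
  | cons c cs' ih =>
      obtain ⟨term, edges⟩ := t
      cases term with
      | some w =>
          refine Or.inr ⟨w, by simp [pvTerms], ?_, rfl⟩
          simp only [pvTrieOk, Bool.and_eq_true, beq_iff_eq] at hok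
          exact hok.1 ▸ List.prefix_append _ _
      | none =>
          simp only [pvTrieOk] at hok
          have hred : pvWalk (.node none edges) (c :: cs') op =
              match pvEdgesGet edges c with
              | none => op
              | some t => pvWalk t cs' op := rfl
          cases hget : pvEdgesGet edges c with
          | none => exact Or.inl (by rw [hred, hget])
          | some t' =>
              have hred2 : pvWalk (.node none edges) (c :: cs') op = pvWalk t' cs' op := by
                rw [hred, hget]
              rcases ih t' (pre ++ [c]) (pv_edgesGet_ok edges pre c t' hok hget) with h | ⟨w, hw, hpre, heq⟩
              · exact Or.inl (hred2.trans h)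
              · refine Or.inr ⟨w, ?_, ?_, hred2.trans heq⟩
                · simpa [pvTerms] using pv_edgesGet_terms edges c t' w hget hw
                · simpa using hpre

-- a probe: walk the trie along exactly these characters, reporting a terminal hit
def pvProbe : PvTrie → List Char → Option String
  | .node (some w) _, _ => some w
  | .node none _, [] => none
  | .node none edges, c :: cs =>
      match pvEdgesGet edges c with
      | none => none
      | some t => pvProbe t cs
termination_by structural _ cs => cs

-- a probe hit determines the walk on every extension, whatever the default
theorem pv_probe_walk (cs : List Char) (t : PvTrie) (w : String) (rest : List Char)
    (op : String) (h : pvProbe t cs = some w) : pvWalk t (cs ++ rest) op = w := by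
  induction cs generalizing t with
  | nil =>
      obtain ⟨term, edges⟩ := t
      cases term with
      | none => cases h
      | some w' => cases h; simp [pvWalk]
  | cons c cs' ih =>
      obtain ⟨term, edges⟩ := t
      cases term with
      | some w' => cases h; simp [pvWalk]
      | none =>
          have hred : pvProbe (.node none edges) (c :: cs') =
              match pvEdgesGet edges c with
              | none => none
              | some t => pvProbe t cs' := rfl
          have hredw : pvWalk (.node none edges) (c :: (cs' ++ rest)) op =
              match pvEdgesGet edges c with
              | none => op
              | some t => pvWalk t (cs' ++ rest) op := rfl
          cases hget : pvEdgesGet edges c with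
          | none => rw [hred, hget] at h; cases h
          | some t' =>
              rw [hred, hget] at h
              show pvWalk (.node none edges) (c :: (cs' ++ rest)) op = w
              rw [hredw, hget]
              exact ih t' h

-- the built trie satisfies the invariant, its terminals are bases, and probing any
-- base's characters hits exactly that base
set_option maxHeartbeats 2000000 in
theorem pv_trie_ok : pvTrieOk [] pvTrie = true := by decide

set_option maxHeartbeats 2000000 in
theorem pv_terms_sub : ∀ w ∈ pvTerms pvTrie, w ∈ pvBases := by decide

set_option maxHeartbeats 2000000 in
theorem pv_probe_bases : ∀ b ∈ pvBases, pvProbe pvTrie b.toList = some b := by decide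

-- completeness at the bases: walking any extension of a base hits that base
theorem pv_walk_hit (b : String) (hb : b ∈ pvBases) (rest : List Char) (op : String) :
    pvWalk pvTrie (b.toList ++ rest) op = b :=
  pv_probe_walk b.toList pvTrie b rest op (pv_probe_bases b hb)

-- the core equivalence: linear startswith scan = trie walk
theorem pv_scan_eq_walk (op : String) :
    pvScanA pvBases op = pvWalk pvTrie op.toList op := by
  by_cases hex : ∃ b ∈ pvBases, PySem.Str.startswith op b = true
  · obtain ⟨b, hb, hsw⟩ := hex
    have huniq : ∀ b' ∈ pvBases, PySem.Str.startswith op b' = true → b' = b :=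
      fun b' hb' h' => pv_unique op b' b hb' hb h' hsw
    rw [pv_scanA_hit pvBases op b hb hsw huniq]
    obtain ⟨rest, hrest⟩ := (pv_startswith_iff op b).mp hsw
    rw [show op.toList = b.toList ++ rest from hrest.symm]
    exact (pv_walk_hit b hb rest op).symm
  · push Not at hex
    have hall : ∀ b ∈ pvBases, PySem.Str.startswith op b = false :=
      fun b hb => by simpa using hex b hb
    rw [pv_scanA_none pvBases op hall]
    rcases pv_walk_sound op.toList pvTrie [] op pv_trie_ok with h | ⟨w, hw, hpre, heq⟩
    · exact h.symm
    · exfalso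
      have hsw : PySem.Str.startswith op w = true :=
        (pv_startswith_iff op w).mpr (by simpa using hpre)
      have := hall w (pv_terms_sub w hw)
      rw [hsw] at this
      cases this

-- ===== VERDICT (by name: the statement is the Claim_ definition above) =====
theorem extract_opcode_spec : Claim_equal_extract_opcode := by
  intro s _hD
  unfold Spec_extract_opcode extract_opcode extract_opcode_alt
  by_cases hg : s = "" ∨ s = "unknown"
  · rw [if_pos hg, if_pos hg]
  · rw [if_neg hg, if_neg hg]
    cases hsp : PySem.Str.split₀ s with
    | nil => rfl
    | cons p rest => exact pv_scan_eq_walk (PySem.Str.lower p)
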